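-- pv_equiv track=rewrite | github.com/nihan-98716/Persona-Aware-Conversational-RAG | pipeline/src/build_artifacts.py | iter_row_spans
-- ===== SOURCE A (Python) =====
-- from typing import Dict, List, Tuple
--
-- def iter_row_spans(messages: List[dict]) -> List[Tuple[int, int]]:
--     if not messages:
--         return []
--     spans: List[Tuple[int, int]] = []
--     start = 0
--     current_row = messages[0]["row_index"]
--     for i, msg in enumerate(messages):
--         if msg["row_index"] != current_row:
--             spans.append((start, i - 1))
--             start = i
--             current_row = msg["row_index"]
--     spans.append((start, len(messages) - 1))
--     return spans
-- ===== SOURCE B (Python) =====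
-- from typing import Dict, List, Tuple
--
-- def iter_row_spans(messages: List[dict]) -> List[Tuple[int, int]]:
--     # Run-splitting: advance over each maximal run of equal row_index at once.
--     spans: List[Tuple[int, int]] = []
--     n = len(messages)
--     i = 0
--     while i < n:
--         key = messages[i]["row_index"]
--         j = i + 1
--         while j < n and messages[j]["row_index"] == key:
--             j += 1
--         spans.append((i, j - 1))
--         i = j
--     return spans
-- ===== Notes on version B (the rewrite author's own statement) =====
-- stated objective: simpler
-- what changed: B replaces A's transition-detecting enumerate loop (which threads spans/start/current_row state and needs an empty-list guard plus a final trailing append) by a run-splitting scan that consumes each maximal run of equal row_index at once and emits its span directly; no guard or trailing append needed.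
import Mathlib
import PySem

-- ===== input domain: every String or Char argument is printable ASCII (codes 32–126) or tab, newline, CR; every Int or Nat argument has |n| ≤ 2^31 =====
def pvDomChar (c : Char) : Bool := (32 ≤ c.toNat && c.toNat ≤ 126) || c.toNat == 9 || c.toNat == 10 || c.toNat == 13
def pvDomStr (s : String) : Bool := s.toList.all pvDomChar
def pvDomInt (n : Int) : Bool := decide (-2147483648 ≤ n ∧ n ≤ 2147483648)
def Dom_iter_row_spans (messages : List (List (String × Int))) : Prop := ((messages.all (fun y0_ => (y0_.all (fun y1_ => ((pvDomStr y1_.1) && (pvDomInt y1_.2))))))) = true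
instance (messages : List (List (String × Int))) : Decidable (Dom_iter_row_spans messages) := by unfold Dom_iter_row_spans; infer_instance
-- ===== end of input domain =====

-- B replaces A's transition-detecting single pass (state: spans/start/current_row, empty guard,
-- trailing append) by a run-splitting scan that consumes each maximal run of equal row_index at
-- once and emits its span directly (objective: simpler).

-- ===== PORT A =====
-- msg["row_index"] (both ports; total under Pre_, which requires the key to be present)
def pvKey (m : List (String × Int)) : Int := (PySem.Dict.mk m).getD "row_index" 0

def iter_row_spans (messages : List (List (String × Int))) : List (Int × Int) :=
  match messages with
  | [] => []
  | m0 :: _ =>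
    let st := (PySem.List.enumerate messages 0).foldl
      (fun (st : List (Int × Int) × Int × Int) p =>
        if pvKey p.2 ≠ st.2.2 then (st.1 ++ [(st.2.1, p.1 - 1)], p.1, pvKey p.2) else st)
      ([], 0, pvKey m0)
    st.1 ++ [(st.2.1, (messages.length : Int) - 1)]

-- ===== PORT B =====
-- outer while: one step per maximal run; the inner while over the run is takeWhile/dropWhile
def pvAltLoop (ms : List (List (String × Int))) (i : Int) : List (Int × Int) :=
  match ms with
  | [] => []
  | m :: rest =>
    let run := rest.takeWhile (fun x => pvKey x == pvKey m)
    (i, i + (1 + (run.length : Int)) - 1) ::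
      pvAltLoop (rest.dropWhile (fun x => pvKey x == pvKey m)) (i + (1 + (run.length : Int)))
termination_by ms.length
decreasing_by
  exact Nat.lt_succ_of_le (List.length_dropWhile_le _ _)

def iter_row_spans_alt (messages : List (List (String × Int))) : List (Int × Int) :=
  pvAltLoop messages 0

-- ===== PRECONDITION & SPEC =====
-- Pre_ excludes messages lacking a "row_index" key, on which Python A raises KeyError.
def Pre_iter_row_spans (messages : List (List (String × Int))) : Prop :=
  ∀ m ∈ messages, (PySem.Dict.mk m).contains "row_index" = true
instance (messages : List (List (String × Int))) : Decidable (Pre_iter_row_spans messages) := by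
  unfold Pre_iter_row_spans; infer_instance

def pvWitness_iter_row_spans : (List (List (String × Int))) :=
  [[("row_index", 1)], [("row_index", 1)], [("row_index", 2)]]

def Spec_iter_row_spans (messages : List (List (String × Int))) (out : List (Int × Int)) : Prop := out = iter_row_spans_alt messages
instance (messages : List (List (String × Int))) (out : List (Int × Int)) : Decidable (Spec_iter_row_spans messages out) := by unfold Spec_iter_row_spans; infer_instance

-- ===== CLAIM (what is proved, stated in full; the proofs are below) =====
def Claim_equal_iter_row_spans : Prop := ∀ (messages : List (List (String × Int))), Dom_iter_row_spans messages → Pre_iter_row_spans messages → Spec_iter_row_spans messages (iter_row_spans messages)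

-- ===== LEMMAS AND PROOFS =====

theorem pvAltLoop_cons (m : List (String × Int)) (rest : List (List (String × Int))) (i : Int) :
    pvAltLoop (m :: rest) i
      = (i, i + (1 + ((rest.takeWhile (fun x => pvKey x == pvKey m)).length : Int)) - 1) ::
        pvAltLoop (rest.dropWhile (fun x => pvKey x == pvKey m))
          (i + (1 + ((rest.takeWhile (fun x => pvKey x == pvKey m)).length : Int))) := by
  rw [pvAltLoop]

-- A's loop body as a named step function
def pvStepA (st : List (Int × Int) × Int × Int) (p : Int × List (String × Int)) :
    List (Int × Int) × Int × Int :=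
  if pvKey p.2 ≠ st.2.2 then (st.1 ++ [(st.2.1, p.1 - 1)], p.1, pvKey p.2) else st

theorem pvStepA_eq (st : List (Int × Int) × Int × Int) (p : Int × List (String × Int)) :
    (fun (st : List (Int × Int) × Int × Int) (p : Int × List (String × Int)) =>
      if pvKey p.2 ≠ st.2.2 then (st.1 ++ [(st.2.1, p.1 - 1)], p.1, pvKey p.2) else st) st p
    = pvStepA st p := rfl

-- accumulator generalisation for A's fold
theorem pvFoldA_acc (l : List (Int × List (String × Int))) :
    ∀ (s : List (Int × Int)) (start cur : Int),
      l.foldl pvStepA (s, start, cur)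
        = (s ++ (l.foldl pvStepA ([], start, cur)).1, (l.foldl pvStepA ([], start, cur)).2) := by
  induction l with
  | nil => intro s start cur; simp
  | cons p l ih =>
    intro s start cur
    simp only [List.foldl_cons, pvStepA]
    by_cases h : pvKey p.2 ≠ cur
    · rw [if_pos h, if_pos h]
      simp only [List.nil_append]
      rw [ih (s ++ [(start, p.1 - 1)]), ih [(start, p.1 - 1)]]
      simp
    · rw [if_neg h, if_neg h]
      exact ih s start cur

-- a run of equal keys leaves A's state untouched
theorem pvFoldA_run (run : List (List (String × Int))) (cur : Int)
    (h : ∀ x ∈ run, pvKey x = cur) :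
    ∀ (i : Int) (s : List (Int × Int)) (start : Int),
      (PySem.List.enumerate run i).foldl pvStepA (s, start, cur) = (s, start, cur) := by
  induction run with
  | nil => intro i s start; simp [PySem.List.enumerate_nil]
  | cons x l ih =>
    intro i s start
    have hx : pvKey x = cur := h x (List.mem_cons_self ..)
    rw [PySem.List.enumerate_cons]
    simp only [List.foldl_cons, pvStepA]
    rw [if_neg (not_not_intro hx)]
    exact ih (fun y hy => h y (List.mem_cons_of_mem _ hy)) (i + 1) s start

theorem pvDropWhile_head {α : Type} (p : α → Bool) (l : List α) (x : α) (xs : List α)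
    (h : l.dropWhile p = x :: xs) : p x = false := by
  induction l with
  | nil => simp at h
  | cons a l ih =>
    by_cases ha : p a
    · rw [List.dropWhile_cons_of_pos ha] at h; exact ih h
    · rw [List.dropWhile_cons_of_neg ha] at h
      cases h; simpa using ha

theorem pvAltLoop_nil (i : Int) : pvAltLoop [] i = [] := by rw [pvAltLoop]

-- A's nonempty-case body, as a function of the start index
def pvFA (ms : List (List (String × Int))) (i : Int) (m0 : List (String × Int)) : List (Int × Int) :=
  ((PySem.List.enumerate ms i).foldl pvStepA ([], i, pvKey m0)).1 ++
    [(((PySem.List.enumerate ms i).foldl pvStepA ([], i, pvKey m0)).2.1, i + (ms.length : Int) - 1)]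

theorem pvMain : ∀ (n : Nat) (m : List (String × Int)) (rest : List (List (String × Int))) (i : Int),
    rest.length ≤ n → pvFA (m :: rest) i m = pvAltLoop (m :: rest) i := by
  intro n
  induction n with
  | zero =>
    intro m rest i hle
    have hr : rest = [] := List.eq_nil_of_length_eq_zero (Nat.le_zero.mp hle)
    subst hr
    rw [pvAltLoop_cons]
    unfold pvFA
    simp [PySem.List.enumerate_cons, PySem.List.enumerate_nil, pvStepA, pvAltLoop_nil]
  | succ n ih =>
    intro m rest i hle
    set run := rest.takeWhile (fun x => pvKey x == pvKey m) with hrun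
    set tl := rest.dropWhile (fun x => pvKey x == pvKey m) with htl
    have hsplit : rest = run ++ tl := (List.takeWhile_append_dropWhile ..).symm
    have hrunkey : ∀ x ∈ run, pvKey x = pvKey m := by
      intro x hx
      have := List.mem_takeWhile_imp (l := rest) (p := fun x => pvKey x == pvKey m) (hrun ▸ hx)
      simpa using this
    -- evaluate A's fold over (m :: run) : state is unchanged
    have hfold1 : ∀ s : List (Int × Int),
        (PySem.List.enumerate (m :: run) i).foldl pvStepA (s, i, pvKey m) = (s, i, pvKey m) := by
      intro s
      rw [PySem.List.enumerate_cons]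
      simp only [List.foldl_cons, pvStepA]
      rw [if_neg (not_not_intro rfl)]
      exact pvFoldA_run run (pvKey m) hrunkey (i + 1) s i
    cases htlc : tl with
    | nil =>
      -- no further transition: rest is a single run
      have hrr : rest = run := by rw [hsplit, htlc]; simp
      rw [pvAltLoop_cons, ← hrun, ← htl, htlc, pvAltLoop_nil]
      unfold pvFA
      rw [hrr, hfold1]
      simp only [List.nil_append, List.cons.injEq, Prod.mk.injEq, List.length_cons, and_true]
      refine ⟨trivial, by push_cast; ring⟩
    | cons t t' =>
      have htkey : pvKey t ≠ pvKey m := by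
        have h2 := pvDropWhile_head (fun x => pvKey x == pvKey m) rest t t' (by rw [← htl, htlc])
        simpa using h2
      have hms : m :: rest = (m :: run) ++ (t :: t') := by rw [hsplit, htlc]; simp
      set j : Int := i + 1 + (run.length : Int) with hj
      have hj2 : i + (1 + (run.length : Int)) = j := by rw [hj]; ring
      have henum : PySem.List.enumerate (m :: rest) i
          = PySem.List.enumerate (m :: run) i ++ PySem.List.enumerate (t :: t') j := by
        rw [hms, PySem.List.enumerate_append,
          show i + (((m :: run)).length : Int) = j from by rw [hj]; push_cast [List.length_cons]; ring]
      have hIH := ih t t' j (by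
        have h1 : run.length + tl.length = rest.length := by rw [hsplit]; simp
        have h2 : tl.length = t'.length + 1 := by rw [htlc]; simp
        omega)
      unfold pvFA at hIH ⊢
      rw [PySem.List.enumerate_cons] at hIH
      simp only [List.foldl_cons, pvStepA] at hIH
      rw [if_neg (not_not_intro rfl)] at hIH
      have hidx : i + ((m :: rest).length : Int) - 1 = j + ((t :: t').length : Int) - 1 := by
        rw [hsplit, htlc, hj]; simp; push_cast; ring
      rw [henum, List.foldl_append, hfold1, PySem.List.enumerate_cons]
      simp only [List.foldl_cons, pvStepA]
      rw [if_pos htkey]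
      simp only [List.nil_append]
      rw [pvFoldA_acc, hidx]
      rw [pvAltLoop_cons, ← hrun, ← htl, htlc, hj2, ← hIH]
      simp

-- ===== VERDICT (by name: the statement is the Claim_ definition above) =====
theorem iter_row_spans_spec : Claim_equal_iter_row_spans := by
  intro messages _ _
  unfold Spec_iter_row_spans iter_row_spans iter_row_spans_alt
  cases messages with
  | nil => simp [pvAltLoop]
  | cons m rest =>
    have := pvMain rest.length m rest 0 (le_refl _)
    unfold pvFA at this
    simp only [pvStepA_eq] at this ⊢
    simpa using this
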